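-- pv_equiv track=rewrite | github.com/quarus-environment/quarus | main.py | FilterImage
-- ===== SOURCE A (Python) =====
-- def FilterImage(arrayThings, filterName):
--     count = 0
--     for v in arrayThings:  # если 2 mouse, то выводим ошибку на сайт: не можем считать мышь или перегруженное кол-во обектов
--         # - отправьте новую фотку
--         if v[1] == filterName:
--             count += 1
--             if count > 1:
--                 return (False, coordinates) ## здесь можно кидать exception, но эт спорно
--                 break
--             coordinates = v[0]
--
--     if count:
--         return (True, coordinates)
--     return (False, [0, 0, 0, 0]) ## и здесь можно кидать exception
-- ===== SOURCE B (Python) =====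
-- def FilterImage(arrayThings, filterName):
--     index = {}
--     for v in arrayThings:
--         cnt, first = index.get(v[1], (0, None))
--         index[v[1]] = (cnt + 1, v[0] if cnt == 0 else first)
--     cnt, first = index.get(filterName, (0, None))
--     if cnt == 0:
--         return (False, [0, 0, 0, 0])
--     return (cnt == 1, first)
-- ===== Notes on version B (the rewrite author's own statement) =====
-- stated objective: alternative
-- what changed: Replaces the count-and-early-return scan for the one filter name by building a dictionary index name -> (count, first coordinates) over ALL names in one pass and then dispatching on a single lookup of filterName.
import Mathlib
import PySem

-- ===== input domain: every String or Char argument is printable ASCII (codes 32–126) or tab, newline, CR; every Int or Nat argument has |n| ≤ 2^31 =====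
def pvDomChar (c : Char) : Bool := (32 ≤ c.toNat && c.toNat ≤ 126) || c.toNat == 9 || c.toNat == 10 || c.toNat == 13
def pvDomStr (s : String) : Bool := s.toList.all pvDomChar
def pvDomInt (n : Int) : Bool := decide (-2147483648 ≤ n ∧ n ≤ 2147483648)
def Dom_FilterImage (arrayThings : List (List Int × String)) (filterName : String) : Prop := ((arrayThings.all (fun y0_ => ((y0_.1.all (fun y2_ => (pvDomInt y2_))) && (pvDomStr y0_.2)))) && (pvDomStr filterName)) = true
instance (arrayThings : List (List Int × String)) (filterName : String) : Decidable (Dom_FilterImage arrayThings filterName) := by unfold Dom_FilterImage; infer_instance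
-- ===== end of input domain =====

-- B replaces A's count-and-early-return scan for the one filter name by building a dictionary
-- index name -> (count, first coordinates) over ALL names, then dispatching on one lookup
-- (objective: alternative).

-- ===== PORT A =====
-- loop state: count, and `coordinates` as Option (none = not yet assigned, as in the Python);
-- it is only read after a match has set it, so getD's default is never reached.
def FilterImageGoA (filterName : String) : List (List Int × String) → Int → Option (List Int) → Bool × List Int
  | [], count, coords =>
      if count ≠ 0 then (true, coords.getD [0, 0, 0, 0])
      else (false, [0, 0, 0, 0])
  | v :: rest, count, coords =>
      if v.2 == filterName then
        if count + 1 > 1 then (false, coords.getD [0, 0, 0, 0])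
        else FilterImageGoA filterName rest (count + 1) (some v.1)
      else FilterImageGoA filterName rest count coords

def FilterImage (arrayThings : List (List Int × String)) (filterName : String) : Bool × List Int :=
  FilterImageGoA filterName arrayThings 0 none

-- ===== PORT B =====
-- index.get(v[1], (0, None)) — Python's None is Option.none; `first` is only read when cnt ≠ 0,
-- at which point it is always `some`, so the final .getD default is never reached.
def FilterImageStep (d : PySem.Dict String (Int × Option (List Int))) (v : List Int × String) :
    PySem.Dict String (Int × Option (List Int)) :=
  let p := d.getD v.2 (0, none)
  d.insert v.2 (p.1 + 1, if p.1 == 0 then some v.1 else p.2)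

def FilterImage_alt (arrayThings : List (List Int × String)) (filterName : String) : Bool × List Int :=
  let index := arrayThings.foldl FilterImageStep PySem.Dict.empty
  let p := index.getD filterName ((0 : Int), (none : Option (List Int)))
  if p.1 == 0 then (false, [0, 0, 0, 0])
  else (p.1 == 1, p.2.getD [0, 0, 0, 0])

-- ===== PRECONDITION & SPEC =====
def Spec_FilterImage (arrayThings : List (List Int × String)) (filterName : String) (out : Bool × List Int) : Prop := out = FilterImage_alt arrayThings filterName
instance (arrayThings : List (List Int × String)) (filterName : String) (out : Bool × List Int) : Decidable (Spec_FilterImage arrayThings filterName out) := by unfold Spec_FilterImage; infer_instance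

-- ===== CLAIM =====
def Claim_equal_FilterImage : Prop := ∀ (arrayThings : List (List Int × String)) (filterName : String), Dom_FilterImage arrayThings filterName → Spec_FilterImage arrayThings filterName (FilterImage arrayThings filterName)

-- ===== LEMMAS AND PROOFS =====

-- Invariant for B's index-building fold, read at key k: starting from a dict whose entry at k has a
-- nonnegative count q, the final entry at k is q bumped by the matches of l (first coords kept).
lemma foldStep_getD (k : String) (l : List (List Int × String))
    (d : PySem.Dict String (Int × Option (List Int)))
    (h : 0 ≤ (d.getD k (0, none)).1) :
    (l.foldl FilterImageStep d).getD k (0, none) =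
      (let q := d.getD k (0, none)
       let m := l.filter (fun v => v.2 == k)
       ((q.1 + m.length : Int),
        if q.1 = 0 then (match m with | [] => q.2 | w :: _ => some w.1) else q.2)) := by
  induction l generalizing d with
  | nil => simp
  | cons v rest ih =>
    by_cases hv : v.2 = k
    · have hd' : (FilterImageStep d v).getD k (0, none) =
          ((d.getD k (0, none)).1 + 1,
           if (d.getD k (0, none)).1 == 0 then some v.1 else (d.getD k (0, none)).2) := by
        simp [FilterImageStep, hv]
      have h' : 0 ≤ ((FilterImageStep d v).getD k (0, none)).1 := by
        rw [hd']; dsimp; omega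
      rw [List.foldl_cons, ih _ h', hd']
      rw [List.filter_cons_of_pos (by simpa using hv)]
      dsimp
      by_cases h0 : (d.getD k (0, none)).1 = 0
      · simp [h0]
        omega
      · have hne1 : ¬ ((d.getD k (0, none)).1 + 1 = 0) := by omega
        simp [h0, hne1]; omega
    · have hd' : (FilterImageStep d v).getD k (0, none) = d.getD k (0, none) := by
        simp [FilterImageStep, PySem.Dict.getD_insert, Ne.symm hv]
      rw [List.foldl_cons, ih _ (by rw [hd']; exact h), hd']
      rw [List.filter_cons_of_neg (by simpa using hv)]

-- B's result, characterised by the list of matching coordinates.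
lemma alt_char (arrayThings : List (List Int × String)) (filterName : String) :
    FilterImage_alt arrayThings filterName =
      (match arrayThings.filter (fun v => v.2 == filterName) with
       | [] => (false, [0, 0, 0, 0])
       | [w] => (true, w.1)
       | w :: _ :: _ => (false, w.1)) := by
  unfold FilterImage_alt
  dsimp only
  rw [foldStep_getD filterName arrayThings PySem.Dict.empty (by simp)]
  simp only [PySem.Dict.getD_empty]
  cases hm : arrayThings.filter (fun v => v.2 == filterName) with
  | nil => simp
  | cons w ws =>
    cases ws with
    | nil => simp
    | cons w2 ws2 =>
      simp only [List.length_cons]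
      have h0 : ¬ ((ws2.length : Int) + 1 + 1 = 0) := by omega
      have h1 : ((ws2.length : Int) + 1 + 1 == 1) = false := by simp; omega
      simp [h0, h1]

-- After the first match (count = 1, coordinates = c), A returns (True, c) iff no further match.
lemma goA_one (filterName : String) (l : List (List Int × String)) (c : List Int) :
    FilterImageGoA filterName l 1 (some c) =
      if l.filter (fun v => v.2 == filterName) = [] then (true, c) else (false, c) := by
  induction l with
  | nil => simp [FilterImageGoA]
  | cons v rest ih =>
    by_cases h : v.2 == filterName
    · simp [FilterImageGoA, h]
    · rw [List.filter_cons_of_neg (by simpa using h)]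
      simp [FilterImageGoA, h, ih]

-- A's result, characterised the same way.
lemma a_char (arrayThings : List (List Int × String)) (filterName : String) :
    FilterImage arrayThings filterName =
      (match arrayThings.filter (fun v => v.2 == filterName) with
       | [] => (false, [0, 0, 0, 0])
       | [w] => (true, w.1)
       | w :: _ :: _ => (false, w.1)) := by
  unfold FilterImage
  induction arrayThings with
  | nil => simp [FilterImageGoA]
  | cons v rest ih =>
    by_cases h : v.2 == filterName
    · rw [List.filter_cons_of_pos (by simpa using h)]
      simp only [FilterImageGoA, h, if_pos]
      norm_num
      rw [goA_one]
      cases hrest : rest.filter (fun v => v.2 == filterName) with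
      | nil => simp
      | cons w ws => simp
    · rw [List.filter_cons_of_neg (by simpa using h)]
      simpa [FilterImageGoA, h] using ih

-- ===== VERDICT =====
theorem FilterImage_spec : Claim_equal_FilterImage := by
  intro arrayThings filterName _
  unfold Spec_FilterImage
  rw [a_char, alt_char]
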